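-- pv_equiv track=rewrite | github.com/LampeB/tactical-rpg-game | tools/generate_backpack_tiers.py | rogue_t6_shape
-- ===== SOURCE A (Python) =====
-- def rogue_t6_shape(W: int, H: int) -> tuple[list, list]:
--     """
--     Rogue T6 — Shadowmaster's Cache (W=12, H=10):
--     Main compartment with a separate bottom pocket strip.
--       row 0        : cols 1..W-2  (cut top corners, initial)
--       rows 1..H-4  : all W        (body, initial)
--       row H-3      : all W        (body, initial)
--       row H-2      : cols 1..W-2  (initial, slight inset)  ← last init row
--       row H-1      : cols 1..W-2  (expansion)
--     """
--     initial, expansion = [], []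
--     for y in range(H):
--         for x in range(W):
--             if y == 0:
--                 if 1 <= x <= W - 2:
--                     initial.append((x, y))
--             elif y <= H - 3:
--                 initial.append((x, y))
--             elif y == H - 2:
--                 if 1 <= x <= W - 2:
--                     initial.append((x, y))
--             else:  # H-1
--                 if 1 <= x <= W - 2:
--                     expansion.append((x, y))
--     return initial, expansion
-- ===== SOURCE B (Python) =====
-- def rogue_t6_shape(W: int, H: int) -> tuple[list, list]:
--     # Closed-form assembly: build the answer directly from its three pieces
--     # (top inset row, solid body block, inset row H-2 | expansion row H-1)
--     # after a case split on H, instead of looping over rows with branches.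
--     def inset(y):
--         return [(x, y) for x in range(1, W - 1)]
--     if H <= 0:
--         return [], []
--     if H == 1:
--         return inset(0), []
--     if H == 2:
--         return inset(0), inset(1)
--     body = [(x, y) for y in range(1, H - 2) for x in range(W)]
--     return inset(0) + body + inset(H - 2), inset(H - 1)
-- ===== Notes on version B (the rewrite author's own statement) =====
-- stated objective: simpler
-- what changed: Replaces A's nested row/column loop with per-cell branch tests by a closed-form assembly: after a case split on H, the result is built directly as top-inset ++ body-block ++ inset row and the expansion strip, with no per-row or per-cell conditionals.
import Mathlib
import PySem

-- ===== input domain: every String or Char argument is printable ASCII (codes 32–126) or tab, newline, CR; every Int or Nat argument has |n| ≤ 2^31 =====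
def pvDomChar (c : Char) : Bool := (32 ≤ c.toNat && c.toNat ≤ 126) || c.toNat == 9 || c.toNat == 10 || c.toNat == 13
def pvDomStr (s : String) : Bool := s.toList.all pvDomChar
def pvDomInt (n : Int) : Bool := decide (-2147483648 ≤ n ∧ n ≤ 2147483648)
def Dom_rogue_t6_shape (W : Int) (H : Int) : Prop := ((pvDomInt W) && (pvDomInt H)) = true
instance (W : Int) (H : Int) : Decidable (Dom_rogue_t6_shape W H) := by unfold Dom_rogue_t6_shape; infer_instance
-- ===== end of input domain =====

-- B replaces A's nested loop with per-cell branch tests by a closed-form assembly of the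
-- three shape pieces after a case split on H (objective: simpler).

-- ===== PORT A =====
def rogue_t6_shape (W : Int) (H : Int) : (List (Int × Int)) × (List (Int × Int)) :=
  (PySem.List.pyRange 0 H 1).foldl (fun acc y =>
    (PySem.List.pyRange 0 W 1).foldl (fun acc x =>
      if y = 0 then
        (if 1 ≤ x ∧ x ≤ W - 2 then (acc.1 ++ [(x, y)], acc.2) else acc)
      else if y ≤ H - 3 then
        (acc.1 ++ [(x, y)], acc.2)
      else if y = H - 2 then
        (if 1 ≤ x ∧ x ≤ W - 2 then (acc.1 ++ [(x, y)], acc.2) else acc)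
      else
        (if 1 ≤ x ∧ x ≤ W - 2 then (acc.1, acc.2 ++ [(x, y)]) else acc)) acc)
    ([], [])

-- ===== PORT B =====
-- inset(y) = [(x, y) for x in range(1, W-1)]
def pvInset (W : Int) (y : Int) : List (Int × Int) :=
  (PySem.List.pyRange 1 (W - 1) 1).map (fun x => (x, y))

def rogue_t6_shape_alt (W : Int) (H : Int) : (List (Int × Int)) × (List (Int × Int)) :=
  if H ≤ 0 then ([], [])
  else if H = 1 then (pvInset W 0, [])
  else if H = 2 then (pvInset W 0, pvInset W 1)
  else
    -- body = [(x, y) for y in range(1, H-2) for x in range(W)]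
    let body := (PySem.List.pyRange 1 (H - 2) 1).flatMap
      (fun y => (PySem.List.pyRange 0 W 1).map (fun x => (x, y)))
    (pvInset W 0 ++ body ++ pvInset W (H - 2), pvInset W (H - 1))

-- ===== PRECONDITION & SPEC =====
def Spec_rogue_t6_shape (W : Int) (H : Int) (out : (List (Int × Int)) × (List (Int × Int))) : Prop := out = rogue_t6_shape_alt W H
instance (W : Int) (H : Int) (out : (List (Int × Int)) × (List (Int × Int))) : Decidable (Spec_rogue_t6_shape W H out) := by unfold Spec_rogue_t6_shape; infer_instance

-- ===== CLAIM =====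
def Claim_equal_rogue_t6_shape : Prop := ∀ (W : Int) (H : Int), Dom_rogue_t6_shape W H → Spec_rogue_t6_shape W H (rogue_t6_shape W H)

-- ===== LEMMAS AND PROOFS =====

-- 'if p(x): fst.append(f(x))' over a list, on a pair accumulator
lemma pvFoldPairFstIf {α : Type} (p : Int → Prop) [DecidablePred p] (f : Int → α) :
    ∀ (l : List Int) (acc : List α × List α),
      l.foldl (fun acc x => if p x then (acc.1 ++ [f x], acc.2) else acc) acc
        = (acc.1 ++ (l.filter fun x => decide (p x)).map f, acc.2) := by
  intro l
  induction l with
  | nil => intro acc; simp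
  | cons a l ih =>
    intro acc
    by_cases h : p a
    · simp [h, ih]
    · simp [h, ih]

-- same, appending to the second component
lemma pvFoldPairSndIf {α : Type} (p : Int → Prop) [DecidablePred p] (f : Int → α) :
    ∀ (l : List Int) (acc : List α × List α),
      l.foldl (fun acc x => if p x then (acc.1, acc.2 ++ [f x]) else acc) acc
        = (acc.1, acc.2 ++ (l.filter fun x => decide (p x)).map f) := by
  intro l
  induction l with
  | nil => intro acc; simp
  | cons a l ih =>
    intro acc
    by_cases h : p a
    · simp [h, ih]
    · simp [h, ih]

-- unconditional 'fst.append(f(x))'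
lemma pvFoldPairFst {α : Type} (f : Int → α) :
    ∀ (l : List Int) (acc : List α × List α),
      l.foldl (fun acc x => (acc.1 ++ [f x], acc.2)) acc = (acc.1 ++ l.map f, acc.2) := by
  intro l
  induction l with
  | nil => intro acc; simp
  | cons a l ih => intro acc; simp [ih]

-- filtering a range by '1 ≤ x ≤ c' clamps the range
lemma pvFilterRange (c : Int) :
    ∀ (n : Nat) (a b : Int), (b - a).toNat = n →
      (PySem.List.pyRange a b 1).filter (fun x => decide (1 ≤ x ∧ x ≤ c))
        = PySem.List.pyRange (max a 1) (min b (c + 1)) 1 := by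
  intro n
  induction n with
  | zero =>
    intro a b hn
    rw [PySem.List.pyRange_one_eq_nil (by omega), PySem.List.pyRange_one_eq_nil (by omega)]
    simp
  | succ n ih =>
    intro a b hn
    have hab : a < b := by omega
    rw [PySem.List.pyRange_one_cons hab]
    by_cases h : 1 ≤ a ∧ a ≤ c
    · rw [List.filter_cons_of_pos (by simpa using h), ih (a + 1) b (by omega)]
      have h1 : max a 1 = a := by omega
      have h2 : max (a + 1) 1 = a + 1 := by omega
      have h3 : a < min b (c + 1) := by omega
      rw [h1, h2]
      conv_rhs => rw [PySem.List.pyRange_one_cons h3]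
    · rw [List.filter_cons_of_neg (by simpa using h), ih (a + 1) b (by omega)]
      rcases not_and_or.mp h with h' | h'
      · congr 1; omega
      · rw [PySem.List.pyRange_one_eq_nil (by omega), PySem.List.pyRange_one_eq_nil (by omega)]

lemma pvInnerRange (W : Int) :
    (PySem.List.pyRange 0 W 1).filter (fun x => decide (1 ≤ x ∧ x ≤ W - 2))
      = PySem.List.pyRange 1 (W - 1) 1 := by
  rw [pvFilterRange (W - 2) (W - 0).toNat 0 W rfl]
  congr 1
  omega

-- A's inner loop over x, evaluated per row-case
lemma pvRow (W H y : Int) (_hy0 : 0 ≤ y) (hyH : y < H)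
    (acc : List (Int × Int) × List (Int × Int)) :
    (PySem.List.pyRange 0 W 1).foldl (fun acc x =>
      if y = 0 then
        (if 1 ≤ x ∧ x ≤ W - 2 then (acc.1 ++ [(x, y)], acc.2) else acc)
      else if y ≤ H - 3 then
        (acc.1 ++ [(x, y)], acc.2)
      else if y = H - 2 then
        (if 1 ≤ x ∧ x ≤ W - 2 then (acc.1 ++ [(x, y)], acc.2) else acc)
      else
        (if 1 ≤ x ∧ x ≤ W - 2 then (acc.1, acc.2 ++ [(x, y)]) else acc)) acc
    = (if y = 0 ∨ y = H - 2 then (acc.1 ++ pvInset W y, acc.2)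
       else if y ≤ H - 3 then
        (acc.1 ++ (PySem.List.pyRange 0 W 1).map (fun x => (x, y)), acc.2)
       else (acc.1, acc.2 ++ pvInset W y)) := by
  unfold pvInset
  by_cases h0 : y = 0
  · simp only [h0, true_or, if_pos]
    rw [pvFoldPairFstIf (fun x => 1 ≤ x ∧ x ≤ W - 2) (fun x => (x, (0 : Int))), pvInnerRange]
  · by_cases h1 : y ≤ H - 3
    · simp only [if_neg h0, if_pos h1]
      rw [pvFoldPairFst (fun x => (x, y))]
      rw [if_neg (show ¬ (y = 0 ∨ y = H - 2) by omega)]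
    · by_cases h2 : y = H - 2
      · simp only [if_neg h0, if_neg h1, if_pos h2]
        rw [pvFoldPairFstIf (fun x => 1 ≤ x ∧ x ≤ W - 2) (fun x => (x, y)), pvInnerRange]
        rw [if_pos (Or.inr h2)]
      · simp only [if_neg h0, if_neg h1, if_neg h2]
        rw [pvFoldPairSndIf (fun x => 1 ≤ x ∧ x ≤ W - 2) (fun x => (x, y)), pvInnerRange]
        rw [if_neg (show ¬ (y = 0 ∨ y = H - 2) by omega)]

-- the middle body rows 1..H-3 accumulate the solid block
lemma pvMid (W H : Int) :
    ∀ (n : Nat) (a : Int), 1 ≤ a → (H - 2 - a).toNat = n →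
      ∀ (acc : List (Int × Int) × List (Int × Int)),
      (PySem.List.pyRange a (H - 2) 1).foldl (fun acc y =>
        (PySem.List.pyRange 0 W 1).foldl (fun acc x =>
          if y = 0 then
            (if 1 ≤ x ∧ x ≤ W - 2 then (acc.1 ++ [(x, y)], acc.2) else acc)
          else if y ≤ H - 3 then
            (acc.1 ++ [(x, y)], acc.2)
          else if y = H - 2 then
            (if 1 ≤ x ∧ x ≤ W - 2 then (acc.1 ++ [(x, y)], acc.2) else acc)
          else
            (if 1 ≤ x ∧ x ≤ W - 2 then (acc.1, acc.2 ++ [(x, y)]) else acc)) acc) acc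
      = (acc.1 ++ (PySem.List.pyRange a (H - 2) 1).flatMap
            (fun y => (PySem.List.pyRange 0 W 1).map (fun x => (x, y))), acc.2) := by
  intro n
  induction n with
  | zero =>
    intro a ha hn acc
    have hnil : PySem.List.pyRange a (H - 2) 1 = [] :=
      PySem.List.pyRange_one_eq_nil (by omega)
    rw [hnil]
    simp
  | succ n ih =>
    intro a ha hn acc
    have hab : a < H - 2 := by omega
    rw [PySem.List.pyRange_one_cons hab]
    simp only [List.foldl_cons, List.flatMap_cons]
    rw [pvRow W H a (by omega) (by omega) acc]
    rw [if_neg (show ¬ (a = 0 ∨ a = H - 2) by omega), if_pos (show a ≤ H - 3 by omega)]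
    rw [ih (a + 1) (by omega) (by omega)]
    simp [List.append_assoc]

-- singleton range at explicit endpoints
lemma pvSing (a b : Int) (h : b = a + 1) : PySem.List.pyRange a b 1 = [a] := by
  subst h; exact PySem.List.pyRange_one_singleton a

-- ===== VERDICT =====
theorem rogue_t6_shape_spec : Claim_equal_rogue_t6_shape := by
  intro W H _
  unfold Spec_rogue_t6_shape rogue_t6_shape rogue_t6_shape_alt
  by_cases h0 : H ≤ 0
  · have hnil : PySem.List.pyRange 0 H 1 = [] := PySem.List.pyRange_one_eq_nil h0
    rw [hnil, if_pos h0]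
    simp
  · by_cases h1 : H = 1
    · subst h1
      have e1 : PySem.List.pyRange 0 1 1 = [0] := by decide
      rw [e1, List.foldl_cons, List.foldl_nil]
      rw [pvRow W 1 0 (by omega) (by omega), if_pos (Or.inl rfl)]
      norm_num
    · by_cases h2 : H = 2
      · subst h2
        have e2 : PySem.List.pyRange 0 2 1 = [0, 1] := by decide
        rw [e2, List.foldl_cons, List.foldl_cons, List.foldl_nil]
        rw [pvRow W 2 0 (by omega) (by omega), if_pos (Or.inr (by norm_num))]
        rw [pvRow W 2 1 (by omega) (by omega), if_neg (by omega), if_neg (by omega)]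
        norm_num
      · have h3 : 3 ≤ H := by omega
        have etail : PySem.List.pyRange (H - 2) H 1 = [H - 2, H - 1] := by
          rw [PySem.List.pyRange_one_cons (by omega), pvSing (H - 2 + 1) H (by ring)]
          norm_num
          omega
        have ehead : PySem.List.pyRange 0 1 1 = [0] := by decide
        have esplit : PySem.List.pyRange 0 H 1
            = [0] ++ PySem.List.pyRange 1 (H - 2) 1 ++ [H - 2, H - 1] := by
          rw [PySem.List.pyRange_one_append 0 (H - 2) H (by omega) (by omega),
              PySem.List.pyRange_one_append 0 1 (H - 2) (by omega) (by omega),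
              ehead, etail]
        rw [esplit, if_neg h0, if_neg h1, if_neg h2]
        rw [List.foldl_append, List.foldl_append, List.foldl_cons, List.foldl_cons,
            List.foldl_cons, List.foldl_nil, List.foldl_nil]
        rw [pvRow W H 0 (by omega) (by omega), if_pos (Or.inl rfl)]
        rw [pvMid W H (H - 2 - 1).toNat 1 (by omega) rfl]
        rw [pvRow W H (H - 2) (by omega) (by omega), if_pos (Or.inr rfl)]
        rw [pvRow W H (H - 1) (by omega) (by omega), if_neg (by omega), if_neg (by omega)]
        simp [List.append_assoc]
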